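-- pv_equiv track=rewrite | github.com/RyabkovaA/Ryabkova-web-dev-2024-2 | lab5/app/users.py | check_user_data
-- ===== SOURCE A (Python) =====
-- CHECK_USER_FIELDS = ['login', 'password', 'last_name', 'first_name', 'role_id']
--
-- def check_user_data(user):
--     errors = {}
--
--     for field in CHECK_USER_FIELDS:
--         if not user.get(field):
--             errors[field] = "Поле не может быть пустым"
--
--     if 'login' not in errors:
--         if len(user['login']) < 5:
--             errors['login'] = "Логин должен содержать не менее 5 символов"
--         elif not user['login'].isalnum():
--             errors['login'] = "Логин должен состоять только из латинских букв и цифр"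
--
--     if 'password' not in errors:
--         errors['password'] = check_password(user['password'])
--
--     return errors
--
-- def check_password(password):
--     if len(password) < 8 or len(password) > 128:
--         return "Пароль должен содержать от 8 до 128 символов"
--
--     if not any(c.isupper() for c in password) or not any(c.islower() for c in password):
--         return "Пароль должен содержать как минимум одну заглавную и одну строчную букву"
--
--     if not any(c.isdigit() for c in password):
--         return "Пароль должен содержать как минимум одну цифру"
--
--     if any(c.isspace() for c in password):
--         return "Пароль не должен содержать пробелы"
--
--     valid_chars = set("~!?@#$%^&*_-+()[]{}></\\|\"'.,:;")
--     for c in password: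
--         if not (c.isalpha() or c.isdigit() or c in valid_chars):
--             return "Пароль содержит недопустимые символы"
--
--     return None
-- ===== SOURCE B (Python) =====
-- # B: single-pass password scan with flags instead of five separate scans/loops;
-- # the empty-field errors are built with a dict comprehension.
-- CHECK_USER_FIELDS = ['login', 'password', 'last_name', 'first_name', 'role_id']
--
-- VALID_PUNCT = set("~!?@#$%^&*_-+()[]{}></\\|\"'.,:;")
--
-- def check_password(password):
--     if not (8 <= len(password) <= 128):
--         return "Пароль должен содержать от 8 до 128 символов"
--     has_upper = has_lower = has_digit = has_space = has_invalid = False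
--     for c in password:
--         if c.isupper():
--             has_upper = True
--         if c.islower():
--             has_lower = True
--         if c.isdigit():
--             has_digit = True
--         if c.isspace():
--             has_space = True
--         if not (c.isalpha() or c.isdigit() or c in VALID_PUNCT):
--             has_invalid = True
--     if not (has_upper and has_lower):
--         return "Пароль должен содержать как минимум одну заглавную и одну строчную букву"
--     if not has_digit:
--         return "Пароль должен содержать как минимум одну цифру"
--     if has_space:
--         return "Пароль не должен содержать пробелы"
--     if has_invalid:
--         return "Пароль содержит недопустимые символы"
--     return None
--
-- def check_user_data(user):
--     errors = {f: "Поле не может быть пустым" for f in CHECK_USER_FIELDS if not user.get(f)}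
--     if 'login' not in errors:
--         login = user['login']
--         if len(login) < 5:
--             errors['login'] = "Логин должен содержать не менее 5 символов"
--         elif not login.isalnum():
--             errors['login'] = "Логин должен состоять только из латинских букв и цифр"
--     if 'password' not in errors:
--         errors['password'] = check_password(user['password'])
--     return errors
-- ===== Notes on version B (the rewrite author's own statement) =====
-- stated objective: simpler
-- what changed: check_password now makes a single pass over the password maintaining has_upper/has_lower/has_digit/has_space/has_invalid flags and tests them afterwards in the original priority order, instead of four separate any() scans plus a dedicated invalid-character loop; the empty-field errors are built with one dict comprehension instead of a loop of conditional assignments.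
import Mathlib
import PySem

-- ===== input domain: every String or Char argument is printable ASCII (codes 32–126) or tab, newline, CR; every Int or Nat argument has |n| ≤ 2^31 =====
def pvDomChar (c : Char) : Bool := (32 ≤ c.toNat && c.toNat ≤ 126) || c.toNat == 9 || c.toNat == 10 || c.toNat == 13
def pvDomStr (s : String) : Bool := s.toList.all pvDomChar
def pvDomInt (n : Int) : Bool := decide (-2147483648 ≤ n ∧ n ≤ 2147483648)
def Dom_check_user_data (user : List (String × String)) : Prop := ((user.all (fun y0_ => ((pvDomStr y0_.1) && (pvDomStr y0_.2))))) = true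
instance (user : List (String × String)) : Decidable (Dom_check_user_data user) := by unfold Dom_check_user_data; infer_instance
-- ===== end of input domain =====

-- B rewrites check_password as a single flag-collecting pass over the password (A makes four any() scans
-- plus a dedicated invalid-character loop) and builds the empty-field errors with a comprehension; same messages, same priority order.


-- shared constants / input-access helpers (same module context in both Pythons)
def pvFields : List String := ["login", "password", "last_name", "first_name", "role_id"]
def pvMsgEmpty : String := "Поле не может быть пустым"
def pvMsgLogin5 : String := "Логин должен содержать не менее 5 символов"
def pvMsgLoginAlnum : String := "Логин должен состоять только из латинских букв и цифр"
def pvMsgPwLen : String := "Пароль должен содержать от 8 до 128 символов"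
def pvMsgPwCase : String := "Пароль должен содержать как минимум одну заглавную и одну строчную букву"
def pvMsgPwDigit : String := "Пароль должен содержать как минимум одну цифру"
def pvMsgPwSpace : String := "Пароль не должен содержать пробелы"
def pvMsgPwInvalid : String := "Пароль содержит недопустимые символы"
def pvValid : List Char := "~!?@#$%^&*_-+()[]{}></\\|\"'.,:;".toList
-- user.get(field): association-list dict, first match
def pvUserGet (user : List (String × String)) (k : String) : Option String :=
  (PySem.Dict.mk user).get? k
-- Python truthiness of user.get(f): None or "" are falsy
def pvFalsy (o : Option String) : Bool :=
  match o with
  | none => true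
  | some s => s.toList.isEmpty
-- the login checks (identical code in both Pythons)
def pvLoginCheck (user : List (String × String)) (e : PySem.Dict String (Option String)) :
    PySem.Dict String (Option String) :=
  let login := ((pvUserGet user "login").getD "").toList
  if login.length < 5 then e.insert "login" (some pvMsgLogin5)
  else if !(PySem.Chars.strIsalnum login) then e.insert "login" (some pvMsgLoginAlnum)
  else e

-- ===== PORT A =====
-- A's final for-loop over the password returning on the first invalid character
def pvInvalidLoop : List Char → Option String
  | [] => none
  | c :: rest =>
      if !(PySem.Chars.isalpha c || PySem.Chars.isdigit c || pvValid.contains c) then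
        some pvMsgPwInvalid
      else pvInvalidLoop rest

def check_password (password : String) : Option String :=
  let cs := password.toList
  if cs.length < 8 || 128 < cs.length then some pvMsgPwLen
  else if !(cs.any (fun c => PySem.Chars.isupper c)) || !(cs.any (fun c => PySem.Chars.islower c)) then
    some pvMsgPwCase
  else if !(cs.any (fun c => PySem.Chars.isdigit c)) then some pvMsgPwDigit
  else if cs.any (fun c => PySem.Chars.isspace c) then some pvMsgPwSpace
  else pvInvalidLoop cs

def check_user_data (user : List (String × String)) : List (String × Option String) :=
  let e1 := pvFields.foldl
    (fun e f => if pvFalsy (pvUserGet user f) then e.insert f (some pvMsgEmpty) else e)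
    PySem.Dict.empty
  let e2 := if e1.contains "login" then e1 else pvLoginCheck user e1
  let e3 := if e2.contains "password" then e2
            else e2.insert "password" (check_password ((pvUserGet user "password").getD ""))
  e3.items

-- ===== PORT B =====
-- one step of B's single flag-collecting pass (u, l, d, s, i) over a password character
def pvStep (a : Bool × Bool × Bool × Bool × Bool) (c : Char) : Bool × Bool × Bool × Bool × Bool :=
  let u := if PySem.Chars.isupper c then true else a.1
  let l := if PySem.Chars.islower c then true else a.2.1
  let d := if PySem.Chars.isdigit c then true else a.2.2.1
  let s := if PySem.Chars.isspace c then true else a.2.2.2.1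
  let i := if !(PySem.Chars.isalpha c || PySem.Chars.isdigit c || pvValid.contains c) then true
           else a.2.2.2.2
  (u, l, d, s, i)

def check_password_alt (password : String) : Option String :=
  let cs := password.toList
  if !(8 ≤ cs.length && cs.length ≤ 128) then some pvMsgPwLen
  else
    let fl := cs.foldl pvStep (false, false, false, false, false)
    if !(fl.1 && fl.2.1) then some pvMsgPwCase
    else if !fl.2.2.1 then some pvMsgPwDigit
    else if fl.2.2.2.1 then some pvMsgPwSpace
    else if fl.2.2.2.2 then some pvMsgPwInvalid
    else none

def check_user_data_alt (user : List (String × String)) : List (String × Option String) :=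
  let e1 := PySem.Dict.ofList
    ((pvFields.filter (fun f => pvFalsy (pvUserGet user f))).map (fun f => (f, some pvMsgEmpty)))
  let e2 := if e1.contains "login" then e1 else pvLoginCheck user e1
  let e3 := if e2.contains "password" then e2
            else e2.insert "password" (check_password_alt ((pvUserGet user "password").getD ""))
  e3.items

-- ===== PRECONDITION & SPEC =====
def Spec_check_user_data (user : List (String × String)) (out : List (String × Option String)) : Prop := out = check_user_data_alt user
instance (user : List (String × String)) (out : List (String × Option String)) : Decidable (Spec_check_user_data user out) := by unfold Spec_check_user_data; infer_instance

-- ===== CLAIM (what is proved, stated in full; the proofs are below) =====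
def Claim_equal_check_user_data : Prop := ∀ (user : List (String × String)), Dom_check_user_data user → Spec_check_user_data user (check_user_data user)

-- ===== LEMMAS AND PROOFS =====
def pvBad (c : Char) : Bool := !(PySem.Chars.isalpha c || PySem.Chars.isdigit c || pvValid.contains c)

theorem pvStep_eq (a : Bool × Bool × Bool × Bool × Bool) (c : Char) :
    pvStep a c = (a.1 || PySem.Chars.isupper c, a.2.1 || PySem.Chars.islower c,
      a.2.2.1 || PySem.Chars.isdigit c, a.2.2.2.1 || PySem.Chars.isspace c,
      a.2.2.2.2 || pvBad c) := by
  unfold pvStep pvBad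
  obtain ⟨u, l, d, s, i⟩ := a
  by_cases h1 : PySem.Chars.isupper c <;>
  by_cases h2 : PySem.Chars.islower c <;>
  by_cases h3 : PySem.Chars.isdigit c <;>
  by_cases h4 : PySem.Chars.isspace c <;>
  by_cases h5 : pvValid.contains c <;>
  simp_all [PySem.Chars.isalpha, Bool.or_comm]

theorem pvFoldl_flags (cs : List Char) (u l d s i : Bool) :
    cs.foldl pvStep (u, l, d, s, i) =
      (u || cs.any (fun c => PySem.Chars.isupper c), l || cs.any (fun c => PySem.Chars.islower c),
       d || cs.any (fun c => PySem.Chars.isdigit c), s || cs.any (fun c => PySem.Chars.isspace c),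
       i || cs.any pvBad) := by
  induction cs generalizing u l d s i with
  | nil => simp
  | cons c rest ih => simp [pvStep_eq, ih, Bool.or_assoc]

theorem pvInvalidLoop_eq (cs : List Char) :
    pvInvalidLoop cs = if cs.any pvBad then some pvMsgPwInvalid else none := by
  induction cs with
  | nil => simp [pvInvalidLoop]
  | cons c rest ih =>
      unfold pvInvalidLoop
      rw [show (!(PySem.Chars.isalpha c || PySem.Chars.isdigit c || pvValid.contains c)) = pvBad c from rfl]
      cases hb : pvBad c <;> simp [hb, ih]

theorem pv_password_eq (p : String) : check_password p = check_password_alt p := by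
  unfold check_password check_password_alt
  simp only [pvFoldl_flags, Bool.false_or, pvInvalidLoop_eq]
  split_ifs <;> first | (simp_all; done) | (simp_all; omega) | (simp_all; aesop)

theorem pv_errors0_eq (user : List (String × String)) :
    pvFields.foldl
      (fun e f => if pvFalsy (pvUserGet user f) then e.insert f (some pvMsgEmpty) else e)
      PySem.Dict.empty =
    PySem.Dict.ofList
      ((pvFields.filter (fun f => pvFalsy (pvUserGet user f))).map (fun f => (f, some pvMsgEmpty))) := by
  by_cases h1 : pvFalsy (pvUserGet user "login") <;>
  by_cases h2 : pvFalsy (pvUserGet user "password") <;>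
  by_cases h3 : pvFalsy (pvUserGet user "last_name") <;>
  by_cases h4 : pvFalsy (pvUserGet user "first_name") <;>
  by_cases h5 : pvFalsy (pvUserGet user "role_id") <;>
  simp_all [pvFields] <;> rfl

-- ===== VERDICT (by name: the statement is the Claim_ definition above) =====
theorem check_user_data_spec : Claim_equal_check_user_data := by
  intro user _
  unfold Spec_check_user_data check_user_data check_user_data_alt
  rw [pv_errors0_eq, pv_password_eq]
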